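-- pv_equiv track=rewrite | github.com/kevinshowkat/brood | brood_engine/realtime/openai_realtime.py | _merge_stream_text
-- ===== SOURCE A (Python) =====
-- def _merge_stream_text(buffer: str, incoming: str) -> str:
--     """Merge potentially overlapping streamed text snapshots."""
--     left = str(buffer or "")
--     right = str(incoming or "")
--     if not right:
--         return left
--     if not left:
--         return right
--     # `response.output_text.done` / `response.done` may include a full snapshot.
--     if right.startswith(left):
--         return right
--     max_overlap = min(len(left), len(right))
--     for size in range(max_overlap, 0, -1):
--         if left.endswith(right[:size]):
--             # Treat full overlap as new content when appending deltas; true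
--             # duplicate suppression for full snapshots is handled above.
--             if size == len(right):
--                 break
--             return left + right[size:]
--     return left + right
-- ===== SOURCE B (Python) =====
-- def _merge_stream_text(buffer: str, incoming: str) -> str:
--     """Merge potentially overlapping streamed text snapshots (KMP overlap)."""
--     left = str(buffer or "")
--     right = str(incoming or "")
--     if not right:
--         return left
--     if not left:
--         return right
--     if right.startswith(left):
--         return right
--     # Longest suffix of `left` that is a prefix of `right`, via the KMP
--     # prefix function of right + sentinel + left (sentinel absent from text).
--     s = right + "\x00" + left
--     pi = [0]
--     k = 0
--     for i in range(1, len(s)):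
--         while k > 0 and s[i] != s[k]:
--             k = pi[k - 1]
--         if s[i] == s[k]:
--             k += 1
--         pi.append(k)
--     if k == len(right):
--         # Full overlap is treated as new content when appending deltas.
--         return left + right
--     return left + right[k:]
-- ===== Notes on version B (the rewrite author's own statement) =====
-- stated objective: faster
-- what changed: Replaces A's descending brute-force scan over all candidate overlap sizes (each slicing a prefix of incoming and testing endswith) with a single KMP prefix-function pass over incoming + '\x00' sentinel + buffer, whose final state is the maximal suffix/prefix overlap.
import Mathlib
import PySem

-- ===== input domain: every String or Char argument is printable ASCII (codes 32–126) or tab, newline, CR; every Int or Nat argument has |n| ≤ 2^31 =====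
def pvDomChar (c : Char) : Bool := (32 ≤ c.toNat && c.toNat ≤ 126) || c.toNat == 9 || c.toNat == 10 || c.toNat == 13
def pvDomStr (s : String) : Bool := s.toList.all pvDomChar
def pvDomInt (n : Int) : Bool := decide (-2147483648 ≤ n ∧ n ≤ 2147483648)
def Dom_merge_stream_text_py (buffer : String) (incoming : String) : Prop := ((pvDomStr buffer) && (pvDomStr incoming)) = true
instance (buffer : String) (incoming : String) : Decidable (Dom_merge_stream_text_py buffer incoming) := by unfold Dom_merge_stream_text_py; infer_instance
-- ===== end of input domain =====

-- B replaces A's descending brute-force overlap scan (each step slicing a prefix of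
-- `incoming`) by one KMP prefix-function pass over incoming + sentinel + buffer.

-- ===== PORT A =====
-- `left = str(buffer or "")` / `right = str(incoming or "")` are the identity on
-- str arguments (`x or ""` is x when x is non-empty and "" otherwise), so the
-- port uses buffer / incoming directly.
-- the `for size in range(max_overlap, 0, -1)` loop; `break` and the fall-through
-- return `left + right`, a match of size < len(right) returns `left + right[size:]`.
def mergeA_loop (l r : List Char) : List Int → List Char
  | [] => l ++ r
  | size :: rest =>
      if PySem.Chars.endswith l (PySem.List.slice r none (some size)) then
        if size = (r.length : Int) then l ++ r
        else l ++ PySem.List.slice r (some size) none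
      else mergeA_loop l r rest

def merge_stream_text_py (buffer : String) (incoming : String) : String :=
  if PySem.Str.len incoming = 0 then buffer
  else if PySem.Str.len buffer = 0 then incoming
  else if PySem.Str.startswith incoming buffer then incoming
  else
    let l := buffer.toList
    let r := incoming.toList
    String.ofList (mergeA_loop l r (PySem.List.pyRange (min l.length r.length : Int) 0 (-1)))

-- ===== PORT B =====
-- `while k > 0 and s[i] != s[k]: k = pi[k - 1]`; fuel = the starting k suffices
-- because each iteration strictly decreases k (pi[k-1] < k).
def kmpFall (s : List Char) (pi : List Nat) (c : Char) : Nat → Nat → Nat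
  | 0, k => k
  | fuel + 1, k =>
      if 0 < k ∧ s.getD k ' ' ≠ c then kmpFall s pi c fuel (pi.getD (k - 1) 0)
      else k

-- one iteration of `for i in range(1, len(s))`: the while loop, the `if s[i] == s[k]`
-- increment, and `pi.append(k)`; state = (k, pi).
def kmpStep (s : List Char) (st : Nat × List Nat) (i : Nat) : Nat × List Nat :=
  let k1 := kmpFall s st.2 (s.getD i ' ') st.1 st.1
  let k2 := if s.getD i ' ' = s.getD k1 ' ' then k1 + 1 else k1
  (k2, st.2 ++ [k2])

def merge_stream_text_py_alt (buffer : String) (incoming : String) : String :=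
  if PySem.Str.len incoming = 0 then buffer
  else if PySem.Str.len buffer = 0 then incoming
  else if PySem.Str.startswith incoming buffer then incoming
  else
    let l := buffer.toList
    let r := incoming.toList
    let s := r ++ '\x00' :: l
    let st := (List.range' 1 (s.length - 1)).foldl (kmpStep s) (0, [0])
    if st.1 = r.length then String.ofList (l ++ r)
    else String.ofList (l ++ r.drop st.1)

-- ===== PRECONDITION & SPEC =====
def Spec_merge_stream_text_py (buffer : String) (incoming : String) (out : String) : Prop := out = merge_stream_text_py_alt buffer incoming
instance (buffer : String) (incoming : String) (out : String) : Decidable (Spec_merge_stream_text_py buffer incoming out) := by unfold Spec_merge_stream_text_py; infer_instance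

-- ===== CLAIM (what is proved, stated in full; the proofs are below) =====
def Claim_equal_merge_stream_text_py : Prop := ∀ (buffer : String) (incoming : String), Dom_merge_stream_text_py buffer incoming → Spec_merge_stream_text_py buffer incoming (merge_stream_text_py buffer incoming)

-- ===== LEMMAS AND PROOFS =====

-- k is a proper border of the length-p prefix of s
abbrev Border (s : List Char) (p k : Nat) : Prop :=
  k < p ∧ (s.take p).drop (p - k) = s.take k

-- longest proper border of the length-p prefix (0 if p ≤ 1)
def lb (s : List Char) (p : Nat) : Nat := Nat.findGreatest (Border s p) (p - 1)

-- the prefix table [lb s 1, …, lb s i]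
def pimap (s : List Char) (i : Nat) : List Nat := (List.range i).map (fun j => lb s (j + 1))

-- A's answer: the largest overlap size ≤ min(|l|,|r|)
def ovK (l r : List Char) : Nat :=
  Nat.findGreatest (fun k => 0 < k ∧ l.drop (l.length - k) = r.take k) (min l.length r.length)

lemma border_zero {s : List Char} {p : Nat} (hp : 0 < p) : Border s p 0 := by
  refine ⟨hp, ?_⟩
  simp [List.drop_eq_nil_of_le]

lemma lb_border {s : List Char} {p : Nat} (hp : 0 < p) : Border s p (lb s p) := by
  rcases Nat.eq_zero_or_pos (lb s p) with h | h
  · rw [h]; exact border_zero hp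
  · have h2 : Nat.findGreatest (Border s p) (p - 1) = lb s p := rfl
    exact (Nat.findGreatest_eq_iff.mp h2).2.1 (by omega)

lemma border_le_lb {s : List Char} {p k : Nat} (h : Border s p k) : k ≤ lb s p :=
  Nat.le_findGreatest (by omega) h

lemma border_trans {s : List Char} {p k j : Nat} (h1 : Border s p k) (h2 : Border s k j) :
    Border s p j := by
  refine ⟨lt_trans h2.1 h1.1, ?_⟩
  have hjk : j ≤ k := le_of_lt h2.1
  have hkp : k ≤ p := le_of_lt h1.1
  calc (s.take p).drop (p - j) = ((s.take p).drop (p - k)).drop (k - j) := by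
        rw [List.drop_drop]; congr 1; omega
    _ = (s.take k).drop (k - j) := by rw [h1.2]
    _ = s.take j := h2.2

lemma border_step_down {s : List Char} {p k j : Nat} (hj : Border s p j) (hk : Border s p k)
    (hlt : j < k) : Border s k j := by
  refine ⟨hlt, ?_⟩
  have hkp : k ≤ p := le_of_lt hk.1
  calc (s.take k).drop (k - j) = ((s.take p).drop (p - k)).drop (k - j) := by rw [hk.2]
    _ = (s.take p).drop (p - j) := by rw [List.drop_drop]; congr 1; omega
    _ = s.take j := hj.2

lemma border_succ_iff {s : List Char} {p k : Nat} (hp : p < s.length) :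
    Border s (p + 1) (k + 1) ↔ (Border s p k ∧ s.getD p ' ' = s.getD k ' ') := by
  constructor
  · rintro ⟨hlt, heq⟩
    have hkp : k < p := by omega
    have hkl : k < s.length := lt_trans hkp hp
    rw [List.take_add_one, List.take_add_one, List.getElem?_eq_getElem hp,
      List.getElem?_eq_getElem hkl] at heq
    simp only [Option.toList_some] at heq
    rw [show p + 1 - (k + 1) = p - k by omega,
      List.drop_append_of_le_length (by simp [List.length_take]; omega)] at heq
    rw [← List.concat_eq_append, ← List.concat_eq_append] at heq
    obtain ⟨h1, h2⟩ := List.concat_inj.mp heq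
    exact ⟨⟨hkp, h1⟩, by rw [List.getD_eq_getElem _ _ hp, List.getD_eq_getElem _ _ hkl, h2]⟩
  · rintro ⟨⟨hkp, h1⟩, h2⟩
    have hkl : k < s.length := lt_trans hkp hp
    refine ⟨by omega, ?_⟩
    rw [List.take_add_one, List.take_add_one, List.getElem?_eq_getElem hp,
      List.getElem?_eq_getElem hkl]
    simp only [Option.toList_some]
    rw [show p + 1 - (k + 1) = p - k by omega,
      List.drop_append_of_le_length (by simp [List.length_take]; omega), h1]
    rw [List.getD_eq_getElem _ _ hp, List.getD_eq_getElem _ _ hkl] at h2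
    rw [h2]

lemma pimap_getD {s : List Char} {i k : Nat} (hk : 0 < k) (hki : k ≤ i) :
    (pimap s i).getD (k - 1) 0 = lb s k := by
  have hlen : k - 1 < ((List.range i).map (fun j => lb s (j + 1))).length := by
    simp [List.length_map, List.length_range]; omega
  unfold pimap
  rw [List.getD_eq_getElem _ _ hlen, List.getElem_map, List.getElem_range]
  congr 1
  omega

lemma kmpFall_post {s : List Char} {i : Nat} (hi : 0 < i) (c : Char) :
    ∀ fuel k, k ≤ fuel → Border s i k →
      (∀ j, Border s i j → s.getD j ' ' = c → j ≤ k) →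
      Border s i (kmpFall s (pimap s i) c fuel k) ∧
      (∀ j, Border s i j → s.getD j ' ' = c → j ≤ kmpFall s (pimap s i) c fuel k) ∧
      (kmpFall s (pimap s i) c fuel k = 0 ∨
        s.getD (kmpFall s (pimap s i) c fuel k) ' ' = c) := by
  intro fuel
  induction fuel with
  | zero =>
    intro k hk hB hM
    have hk0 : k = 0 := by omega
    subst hk0
    exact ⟨border_zero hi, hM, Or.inl rfl⟩
  | succ fuel ih =>
    intro k hk hB hM
    simp only [kmpFall]
    split_ifs with h
    · obtain ⟨hkpos, hne⟩ := h
      have hki : k ≤ i := le_of_lt hB.1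
      rw [pimap_getD hkpos hki]
      have hlbk : lb s k ≤ k - 1 := Nat.findGreatest_le _
      refine ih (lb s k) (by omega) (border_trans hB (lb_border hkpos)) ?_
      intro j hj hjc
      have hjk : j ≤ k := hM j hj hjc
      have hjne : j ≠ k := by rintro rfl; exact hne hjc
      exact border_le_lb (border_step_down hj hB (by omega))
    · refine ⟨hB, hM, ?_⟩
      by_cases hk0 : k = 0
      · exact Or.inl hk0
      · refine Or.inr ?_
        by_contra hne
        exact h ⟨by omega, hne⟩

lemma step_result {s : List Char} {i : Nat} (hi : 0 < i) (hin : i < s.length) (k : Nat)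
    (hb : Border s i k) (hM : ∀ j, Border s i j → s.getD j ' ' = s.getD i ' ' → j ≤ k)
    (hend : k = 0 ∨ s.getD k ' ' = s.getD i ' ') :
    (if s.getD i ' ' = s.getD k ' ' then k + 1 else k) = lb s (i + 1) := by
  split_ifs with hc
  · refine le_antisymm ?_ ?_
    · exact Nat.le_findGreatest (by omega) ((border_succ_iff hin).mpr ⟨hb, hc⟩)
    · rcases Nat.eq_zero_or_pos (lb s (i + 1)) with h0 | h0
      · omega
      · have hK : Border s (i + 1) (lb s (i + 1)) := lb_border (by omega)
        have hKe : lb s (i + 1) - 1 + 1 = lb s (i + 1) := by omega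
        rw [← hKe] at hK
        obtain ⟨hK1, hK2⟩ := (border_succ_iff hin).mp hK
        have := hM _ hK1 hK2.symm
        omega
  · have hk0 : k = 0 := by
      rcases hend with h | h
      · exact h
      · exact absurd h.symm hc
    subst hk0
    rcases Nat.eq_zero_or_pos (lb s (i + 1)) with h0 | h0
    · omega
    · exfalso
      have hK : Border s (i + 1) (lb s (i + 1)) := lb_border (by omega)
      have hKe : lb s (i + 1) - 1 + 1 = lb s (i + 1) := by omega
      rw [← hKe] at hK
      obtain ⟨hK1, hK2⟩ := (border_succ_iff hin).mp hK
      have h1 : lb s (i + 1) - 1 = 0 := by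
        have := hM _ hK1 hK2.symm
        omega
      rw [h1] at hK2
      exact hc hK2

lemma kmpFold_inv (s : List Char) :
    ∀ m, 1 + m ≤ s.length →
      (List.range' 1 m).foldl (kmpStep s) (0, [0]) = (lb s (1 + m), pimap s (1 + m)) := by
  intro m
  induction m with
  | zero =>
    intro _
    have h1 : lb s 1 = 0 := rfl
    simp [pimap, h1]
  | succ m ih =>
    intro hlen
    have hi : 0 < 1 + m := by omega
    have hin : 1 + m < s.length := by omega
    rw [List.range'_concat, List.foldl_append, ih (by omega)]
    simp only [List.foldl_cons, List.foldl_nil]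
    have hone : 1 + 1 * m = 1 + m := by omega
    rw [hone]
    set i := 1 + m with hidef
    have hpost := kmpFall_post hi (s.getD i ' ') (lb s i) (lb s i) le_rfl
      (lb_border hi) (fun j hj _ => border_le_lb hj)
    obtain ⟨hB, hM, hend⟩ := hpost
    have hres := step_result hi hin _ hB hM hend
    unfold kmpStep
    simp only []
    rw [hres]
    rw [show 1 + (m + 1) = i + 1 by omega]
    have hp : pimap s i ++ [lb s (i + 1)] = pimap s (i + 1) := by
      unfold pimap
      rw [List.range_succ, List.map_append]
      simp
    rw [hp]

lemma sep_not_mem {t : String} (h : pvDomStr t = true) : '\x00' ∉ t.toList := by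
  intro hmem
  unfold pvDomStr at h
  rw [List.all_eq_true] at h
  exact absurd (h _ hmem) (by decide)

lemma border_concat_iff {l r : List Char} (hl : '\x00' ∉ l) (hr : '\x00' ∉ r) {k : Nat} :
    Border (r ++ '\x00' :: l) (r.length + (l.length + 1)) k ↔
      (k ≤ min l.length r.length ∧ l.drop (l.length - k) = r.take k) := by
  set s := r ++ '\x00' :: l with hs
  set n := r.length + (l.length + 1) with hn
  have hlen : s.length = n := by simp [hs, hn]
  have htaken : s.take n = s := by rw [← hlen, List.take_length]
  have hsep : s[r.length]? = some '\x00' := by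
    rw [hs, List.getElem?_append_right le_rfl]
    simp
  have hdropeq : ∀ k', k' ≤ l.length → s.drop (n - k') = l.drop (l.length - k') := by
    intro k' hk'
    rw [hs, show n - k' = r.length + (l.length + 1 - k') by omega, List.drop_append]
    rw [List.drop_eq_nil_of_le (by omega),
      show r.length + (l.length + 1 - k') - r.length = (l.length - k') + 1 by omega,
      List.drop_succ_cons, List.nil_append]
  constructor
  · rintro ⟨hklt, heq⟩
    rw [htaken] at heq
    have kr : k ≤ r.length := by
      by_contra hgt
      have h2 : (s.drop (n - k))[r.length]? = s[n - k + r.length]? := List.getElem?_drop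
      rw [heq, List.getElem?_take, if_pos (by omega), hsep] at h2
      set t := n - k - 1 with ht
      have h3 : s[n - k + r.length]? = l[t]? := by
        rw [hs, List.getElem?_append_right (by omega)]
        rw [show n - k + r.length - r.length = t + 1 by omega]
        simp
      have htl : t < l.length := by omega
      rw [h3, List.getElem?_eq_getElem htl] at h2
      exact hl (by rw [show '\x00' = l[t] from Option.some.inj h2]; exact List.getElem_mem htl)
    have kl : k ≤ l.length := by
      by_contra hgt
      set j := k - l.length - 1 with hj
      have hjr : j < r.length := by omega
      have h2 : (s.drop (n - k))[j]? = s[n - k + j]? := List.getElem?_drop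
      rw [heq, List.getElem?_take, if_pos (by omega)] at h2
      rw [show n - k + j = r.length by omega, hsep] at h2
      have h3 : s[j]? = r[j]? := by rw [hs, List.getElem?_append_left (by omega)]
      rw [h3, List.getElem?_eq_getElem hjr] at h2
      exact hr (by rw [show '\x00' = r[j] from (Option.some.inj h2).symm]; exact List.getElem_mem hjr)
    rw [hdropeq k kl, List.take_append_of_le_length kr] at heq
    exact ⟨by omega, heq⟩
  · rintro ⟨hmin, heq⟩
    refine ⟨by omega, ?_⟩
    rw [htaken, hdropeq k (by omega), List.take_append_of_le_length (by omega)]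
    exact heq

lemma lb_concat_eq_ovK {l r : List Char} (hl : '\x00' ∉ l) (hr : '\x00' ∉ r) :
    lb (r ++ '\x00' :: l) (r.length + (l.length + 1)) = ovK l r := by
  set s := r ++ '\x00' :: l with hs
  set n := r.length + (l.length + 1) with hn
  refine le_antisymm ?_ ?_
  · rcases Nat.eq_zero_or_pos (lb s n) with h0 | h0
    · omega
    · obtain ⟨hmin, heq⟩ := (border_concat_iff hl hr).mp (lb_border (by omega))
      exact Nat.le_findGreatest hmin ⟨h0, heq⟩
  · rcases Nat.eq_zero_or_pos (ovK l r) with h0 | h0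
    · omega
    · have hP : 0 < ovK l r ∧ l.drop (l.length - ovK l r) = r.take (ovK l r) := by
        have h2 : Nat.findGreatest (fun k => 0 < k ∧ l.drop (l.length - k) = r.take k)
            (min l.length r.length) = ovK l r := rfl
        exact (Nat.findGreatest_eq_iff.mp h2).2.1 (by omega)
      have hle : ovK l r ≤ min l.length r.length := Nat.findGreatest_le _
      exact border_le_lb ((border_concat_iff hl hr).mpr ⟨hle, hP.2⟩)

lemma mergeA_loop_eq (l r : List Char) (hr : r ≠ []) :
    ∀ a : Nat, a ≤ min l.length r.length →
      mergeA_loop l r (PySem.List.pyRange (a : Int) 0 (-1)) =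
        (if Nat.findGreatest (fun k => 0 < k ∧ l.drop (l.length - k) = r.take k) a = r.length
          then l ++ r
          else l ++ r.drop (Nat.findGreatest (fun k => 0 < k ∧ l.drop (l.length - k) = r.take k) a)) := by
  intro a
  induction a with
  | zero =>
    intro _
    rw [show ((0 : Nat) : Int) = 0 from rfl, PySem.List.pyRange_neg_one_eq_nil le_rfl]
    have hrl : r.length ≠ 0 := by simpa using hr
    simp only [mergeA_loop, Nat.findGreatest_zero]
    rw [if_neg (by omega), List.drop_zero]
  | succ a ih =>
    intro ha
    rw [show ((a + 1 : Nat) : Int) = ((a + 1 : Nat) : Int) from rfl,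
      PySem.List.pyRange_neg_one_cons (by exact_mod_cast Nat.succ_pos a)]
    simp only [mergeA_loop]
    rw [show ((a + 1 : Nat) : Int) - 1 = ((a : Nat) : Int) by push_cast; ring]
    rw [PySem.List.slice_to_natCast]
    by_cases hE : PySem.Chars.endswith l (r.take (a + 1)) = true
    · rw [if_pos hE]
      have hsuf : r.take (a + 1) <:+ l := (PySem.Chars.endswith_iff _ _).mp hE
      have hlt : (r.take (a + 1)).length = a + 1 := by
        rw [List.length_take]; omega
      have hP : 0 < a + 1 ∧ l.drop (l.length - (a + 1)) = r.take (a + 1) := by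
        refine ⟨Nat.succ_pos a, ?_⟩
        have := List.suffix_iff_eq_drop.mp hsuf
        rw [hlt] at this
        exact this.symm
      rw [Nat.findGreatest_succ, if_pos hP]
      by_cases hfull : a + 1 = r.length
      · rw [if_pos (by exact_mod_cast hfull), if_pos hfull]
      · rw [if_neg (by exact_mod_cast hfull), if_neg hfull,
          PySem.List.slice_from_natCast]
    · rw [if_neg hE]
      have hnP : ¬(0 < a + 1 ∧ l.drop (l.length - (a + 1)) = r.take (a + 1)) := by
        rintro ⟨-, heq⟩
        exact hE ((PySem.Chars.endswith_iff _ _).mpr (heq ▸ List.drop_suffix _ _))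
      rw [Nat.findGreatest_succ, if_neg hnP]
      exact ih (by omega)

-- ===== VERDICT (by name: the statement is the Claim_ definition above) =====
theorem merge_stream_text_py_spec : Claim_equal_merge_stream_text_py := by
  intro buffer incoming hdom
  unfold Spec_merge_stream_text_py
  unfold Dom_merge_stream_text_py at hdom
  rw [Bool.and_eq_true] at hdom
  have hl0 : '\x00' ∉ buffer.toList := sep_not_mem hdom.1
  have hr0 : '\x00' ∉ incoming.toList := sep_not_mem hdom.2
  unfold merge_stream_text_py merge_stream_text_py_alt
  split_ifs with h1 h2 h3
  · rfl
  · rfl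
  · rfl
  · set l := buffer.toList with hldef
    set r := incoming.toList with hrdef
    have hrne : r ≠ [] := by
      intro he
      apply h1
      rw [PySem.Str.len_eq, ← hrdef, he]
      rfl
    have hlne : l ≠ [] := by
      intro he
      apply h2
      rw [PySem.Str.len_eq, ← hldef, he]
      rfl
    set s := r ++ '\x00' :: l with hsdef
    have hslen : s.length = r.length + (l.length + 1) := by simp [hsdef]
    have hspos : 0 < s.length := by rw [hslen]; omega
    have hfold := kmpFold_inv s (s.length - 1) (by omega)
    rw [show 1 + (s.length - 1) = s.length from by omega] at hfold
    have hkey : lb s s.length = ovK l r := by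
      rw [hslen]
      exact lb_concat_eq_ovK hl0 hr0
    have hov : Nat.findGreatest
        (fun k => 0 < k ∧ l.drop (l.length - k) = r.take k) (min l.length r.length)
        = ovK l r := rfl
    simp only [← Nat.cast_min]
    rw [← hsdef, hfold]
    dsimp only
    rw [hkey, mergeA_loop_eq l r hrne _ le_rfl, hov]
    split_ifs <;> rfl
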